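-- pv_equiv track=rewrite | github.com/kawazoi/aws-ecs-fastapi-service | src/server/libs/my_classifier.py | filtered_comments_by_type
-- ===== SOURCE A (Python) =====
-- def filtered_comments_by_type(comments):
--     """ Filter comments by type (positive, negative and neutral).
--     """
--     flag_positive, flag_negative, flag_neutral = False, False, 0
--     filtered_comments = []
--
--     for comment in comments:
--         if comment["type"] == "positive" and not flag_positive:
--             filtered_comments.append((comment, 1))
--             flag_positive = True
--         if comment["type"] == "negative" and not flag_negative:
--             filtered_comments.append((comment, 2))
--             flag_negative = True
--         if comment["type"] == "neutral" and flag_neutral < 2: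
--             filtered_comments.append((comment, 3))
--             flag_neutral += 1
--
--     # Sort comments by type
--     filtered_comments.sort(key=lambda tup: tup[1])
--
--     return [it[0] for it in filtered_comments]
-- ===== SOURCE B (Python) =====
-- def filtered_comments_by_type(comments):
--     """Filter comments by type (positive, negative and neutral)."""
--     first_positive = None
--     first_negative = None
--     first_neutrals = []
--
--     for comment in comments:
--         ctype = comment["type"]
--         if ctype == "positive":
--             if first_positive is None:
--                 first_positive = comment
--         elif ctype == "negative":
--             if first_negative is None:
--                 first_negative = comment
--         elif ctype == "neutral":
--             if len(first_neutrals) < 2: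
--                 first_neutrals.append(comment)
--
--     result = []
--     if first_positive is not None:
--         result.append(first_positive)
--     if first_negative is not None:
--         result.append(first_negative)
--     return result + first_neutrals
-- ===== Notes on version B (the rewrite author's own statement) =====
-- stated objective: simpler
-- what changed: Replaced the tag-and-sort scheme (appending (comment, rank) pairs and sorting by rank) with three explicit buckets filled in one pass (first positive, first negative, first two neutrals) concatenated in fixed order, eliminating the sort.
import Mathlib
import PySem

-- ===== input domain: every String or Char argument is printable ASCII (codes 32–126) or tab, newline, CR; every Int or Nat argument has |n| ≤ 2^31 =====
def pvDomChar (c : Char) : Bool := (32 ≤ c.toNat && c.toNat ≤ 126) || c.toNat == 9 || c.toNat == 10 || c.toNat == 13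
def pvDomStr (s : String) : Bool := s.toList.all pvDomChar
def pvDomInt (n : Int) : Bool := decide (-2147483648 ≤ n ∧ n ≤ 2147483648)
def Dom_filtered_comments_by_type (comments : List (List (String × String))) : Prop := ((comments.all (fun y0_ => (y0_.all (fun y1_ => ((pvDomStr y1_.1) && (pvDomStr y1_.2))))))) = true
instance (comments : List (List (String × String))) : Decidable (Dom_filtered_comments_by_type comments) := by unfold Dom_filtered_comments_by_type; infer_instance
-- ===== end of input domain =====

-- B replaces A's tag-and-sort scheme by three buckets filled in one pass and
-- concatenated in fixed order (objective: simpler, no sort).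

-- shared dict-lookup primitive: comment["type"] (first match; Pre_ guarantees the key exists)
def pvType (c : List (String × String)) : String :=
  ((PySem.Dict.mk c).get? "type").getD ""

-- ===== PORT A =====
-- loop body of A: three sequential ifs updating (flag_positive, flag_negative, flag_neutral) and the tagged list
def pvStepA (s : (Bool × Bool × Int) × List (List (String × String) × Int))
    (c : List (String × String)) :
    (Bool × Bool × Int) × List (List (String × String) × Int) :=
  let s1 := if pvType c = "positive" ∧ s.1.1 = false then
      ((true, s.1.2.1, s.1.2.2), s.2 ++ [(c, (1 : Int))]) else s
  let s2 := if pvType c = "negative" ∧ s1.1.2.1 = false then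
      ((s1.1.1, true, s1.1.2.2), s1.2 ++ [(c, (2 : Int))]) else s1
  if pvType c = "neutral" ∧ s2.1.2.2 < 2 then
      ((s2.1.1, s2.1.2.1, s2.1.2.2 + 1), s2.2 ++ [(c, (3 : Int))]) else s2

def filtered_comments_by_type (comments : List (List (String × String))) : List (List (String × String)) :=
  let r := comments.foldl pvStepA ((false, false, 0), [])
  (PySem.List.sorted r.2 (fun t => t.2) false).map (fun t => t.1)

-- ===== PORT B =====
-- loop body of B: first-positive slot, first-negative slot, first two neutrals
def pvStepB (s : Option (List (String × String)) × Option (List (String × String)) × List (List (String × String)))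
    (c : List (String × String)) :
    Option (List (String × String)) × Option (List (String × String)) × List (List (String × String)) :=
  let t := pvType c
  if t = "positive" then (if s.1 = none then (some c, s.2.1, s.2.2) else s)
  else if t = "negative" then (if s.2.1 = none then (s.1, some c, s.2.2) else s)
  else if t = "neutral" then (if s.2.2.length < 2 then (s.1, s.2.1, s.2.2 ++ [c]) else s)
  else s

def filtered_comments_by_type_alt (comments : List (List (String × String))) : List (List (String × String)) :=
  let r := comments.foldl pvStepB (none, none, [])
  r.1.toList ++ r.2.1.toList ++ r.2.2

-- ===== PRECONDITION & SPEC =====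
-- Pre_ excludes comments missing the "type" key, where Python A raises KeyError.
def Pre_filtered_comments_by_type (comments : List (List (String × String))) : Prop :=
  (comments.all (fun c => c.any (fun p => p.1 == "type"))) = true
instance (comments : List (List (String × String))) : Decidable (Pre_filtered_comments_by_type comments) := by unfold Pre_filtered_comments_by_type; infer_instance
def pvWitness_filtered_comments_by_type : (List (List (String × String))) :=
  [[("type", "positive")], [("type", "neutral")]]
def Spec_filtered_comments_by_type (comments : List (List (String × String))) (out : List (List (String × String))) : Prop := out = filtered_comments_by_type_alt comments
instance (comments : List (List (String × String))) (out : List (List (String × String))) : Decidable (Spec_filtered_comments_by_type comments out) := by unfold Spec_filtered_comments_by_type; infer_instance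

-- ===== CLAIM (what is proved, stated in full; the proofs are below) =====
def Claim_equal_filtered_comments_by_type : Prop := ∀ (comments : List (List (String × String))), Dom_filtered_comments_by_type comments → Pre_filtered_comments_by_type comments → Spec_filtered_comments_by_type comments (filtered_comments_by_type comments)

-- ===== LEMMAS AND PROOFS =====

-- the relation the two loop states keep in lock-step
def pvRel (sa : (Bool × Bool × Int) × List (List (String × String) × Int))
    (sb : Option (List (String × String)) × Option (List (String × String)) × List (List (String × String))) : Prop :=
  sa.1.1 = sb.1.isSome ∧ sa.1.2.1 = sb.2.1.isSome ∧ sa.1.2.2 = (sb.2.2.length : Int) ∧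
  sa.2.filter (fun p => p.2 == 1) = sb.1.toList.map (fun c => (c, (1 : Int))) ∧
  sa.2.filter (fun p => p.2 == 2) = sb.2.1.toList.map (fun c => (c, (2 : Int))) ∧
  sa.2.filter (fun p => p.2 == 3) = sb.2.2.map (fun c => (c, (3 : Int))) ∧
  ∀ p ∈ sa.2, p.2 = 1 ∨ p.2 = 2 ∨ p.2 = 3

lemma insertBy_append_of_not {α : Type} (before : α → α → Bool) (x : α) (l rest : List α)
    (h : ∀ y ∈ l, before x y = false) :
    PySem.List.insertBy before x (l ++ rest) = l ++ PySem.List.insertBy before x rest := by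
  induction l with
  | nil => simp
  | cons a t ih =>
    simp only [List.cons_append, PySem.List.insertBy, h a (by simp)]
    simp [ih (fun y hy => h y (by simp [hy]))]

lemma insertBy_all_not {α : Type} (before : α → α → Bool) (x : α) (l : List α)
    (h : ∀ y ∈ l, before x y = false) :
    PySem.List.insertBy before x l = l ++ [x] := by
  induction l with
  | nil => simp [PySem.List.insertBy]
  | cons a t ih =>
    simp only [PySem.List.insertBy, h a (by simp)]
    simp [ih (fun y hy => h y (by simp [hy]))]

lemma insertBy_all_lt {α : Type} (before : α → α → Bool) (x : α) (rest : List α)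
    (h : ∀ y ∈ rest, before x y = true) :
    PySem.List.insertBy before x rest = x :: rest := by
  cases rest with
  | nil => simp [PySem.List.insertBy]
  | cons a t => simp [PySem.List.insertBy, h a (by simp)]

lemma mem_filter_tag (l : List (List (String × String) × Int)) (k : Int) (y : List (String × String) × Int)
    (hy : y ∈ l.filter (fun p => p.2 == k)) : y.2 = k := by
  have := (List.mem_filter.mp hy).2
  simpa using this

-- a stable sort whose keys all lie in {1,2,3} is bucket concatenation
lemma sorted3 (l : List (List (String × String) × Int))
    (h : ∀ p ∈ l, p.2 = 1 ∨ p.2 = 2 ∨ p.2 = 3) :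
    PySem.List.sorted l (fun p => p.2) false =
      l.filter (fun p => p.2 == 1) ++ l.filter (fun p => p.2 == 2) ++ l.filter (fun p => p.2 == 3) := by
  rw [PySem.List.sorted_eq_foldl_insertBy]
  induction l using List.reverseRecOn with
  | nil => simp
  | append_singleton t x ih =>
    rw [List.foldl_append, ih (fun p hp => h p (by simp [hp]))]
    simp only [List.foldl_cons, List.foldl_nil, List.filter_append]
    rcases h x (by simp) with h1 | h2 | h3
    · rw [List.append_assoc,
        insertBy_append_of_not _ x (t.filter (fun p => p.2 == 1))
          (t.filter (fun p => p.2 == 2) ++ t.filter (fun p => p.2 == 3))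
          (fun y hy => by simp [mem_filter_tag t 1 y hy, h1]),
        insertBy_all_lt _ x _
          (fun y hy => by
            rcases List.mem_append.mp hy with hy | hy
            · simp [mem_filter_tag t 2 y hy, h1]
            · simp [mem_filter_tag t 3 y hy, h1])]
      simp [h1]
    · rw [insertBy_append_of_not _ x (t.filter (fun p => p.2 == 1) ++ t.filter (fun p => p.2 == 2))
          (t.filter (fun p => p.2 == 3))
          (fun y hy => by
            rcases List.mem_append.mp hy with hy | hy
            · simp [mem_filter_tag t 1 y hy, h2]
            · simp [mem_filter_tag t 2 y hy, h2]),
        insertBy_all_lt _ x _ (fun y hy => by simp [mem_filter_tag t 3 y hy, h2])]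
      simp [h2]
    · rw [insertBy_all_not _ x _
          (fun y hy => by
            rcases List.mem_append.mp hy with hy | hy
            rcases List.mem_append.mp hy with hy' | hy'
            · simp [mem_filter_tag t 1 y hy', h3]
            · simp [mem_filter_tag t 2 y hy', h3]
            · simp [mem_filter_tag t 3 y hy, h3])]
      simp [h3]

lemma rel_step (sa : (Bool × Bool × Int) × List (List (String × String) × Int))
    (sb : Option (List (String × String)) × Option (List (String × String)) × List (List (String × String)))
    (c : List (String × String)) (hrel : pvRel sa sb) : pvRel (pvStepA sa c) (pvStepB sb c) := by
  obtain ⟨⟨fp, fn, fc⟩, acc⟩ := sa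
  obtain ⟨pos, neg, neut⟩ := sb
  obtain ⟨h1, h2, h3, h4, h5, h6, h7⟩ := hrel
  simp only at h1 h2 h3 h4 h5 h6 h7
  by_cases hp : pvType c = "positive"
  · cases pos with
    | some v =>
      have hfp : fp = true := by simp [h1]
      have ea : pvStepA ((fp, fn, fc), acc) c = ((fp, fn, fc), acc) := by
        simp [pvStepA, hp, hfp]
      have eb : pvStepB (some v, neg, neut) c = (some v, neg, neut) := by
        simp [pvStepB, hp]
      rw [ea, eb]
      exact ⟨h1, h2, h3, h4, h5, h6, h7⟩
    | none =>
      have hfp : fp = false := by simp [h1]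
      have ea : pvStepA ((fp, fn, fc), acc) c = ((true, fn, fc), acc ++ [(c, 1)]) := by
        simp [pvStepA, hp, hfp]
      have eb : pvStepB (none, neg, neut) c = (some c, neg, neut) := by
        simp [pvStepB, hp]
      rw [ea, eb]
      refine ⟨by simp, h2, h3, ?_, ?_, ?_, ?_⟩
      · simp [List.filter_append, h4]
      · simp [List.filter_append, h5]
      · simp [List.filter_append, h6]
      · intro p hp'
        rcases List.mem_append.mp hp' with hh | hh
        · exact h7 p hh
        · simp at hh; simp [hh]
  · by_cases hn : pvType c = "negative"
    · cases neg with
      | some v =>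
        have hfn : fn = true := by simp [h2]
        have ea : pvStepA ((fp, fn, fc), acc) c = ((fp, fn, fc), acc) := by
          simp [pvStepA, hn, hfn]
        have eb : pvStepB (pos, some v, neut) c = (pos, some v, neut) := by
          simp [pvStepB, hn]
        rw [ea, eb]
        exact ⟨h1, h2, h3, h4, h5, h6, h7⟩
      | none =>
        have hfn : fn = false := by simp [h2]
        have ea : pvStepA ((fp, fn, fc), acc) c = ((fp, true, fc), acc ++ [(c, 2)]) := by
          simp [pvStepA, hn, hfn]
        have eb : pvStepB (pos, none, neut) c = (pos, some c, neut) := by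
          simp [pvStepB, hn]
        rw [ea, eb]
        refine ⟨h1, by simp, h3, ?_, ?_, ?_, ?_⟩
        · simp [List.filter_append, h4]
        · simp [List.filter_append, h5]
        · simp [List.filter_append, h6]
        · intro p hp'
          rcases List.mem_append.mp hp' with hh | hh
          · exact h7 p hh
          · simp at hh; simp [hh]
    · by_cases hu : pvType c = "neutral"
      · by_cases hlen : neut.length < 2
        · have hfc : fc < 2 := by rw [h3]; exact_mod_cast hlen
          have ea : pvStepA ((fp, fn, fc), acc) c = ((fp, fn, fc + 1), acc ++ [(c, 3)]) := by
            simp [pvStepA, hu, hfc]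
          have eb : pvStepB (pos, neg, neut) c = (pos, neg, neut ++ [c]) := by
            simp [pvStepB, hu, hlen]
          rw [ea, eb]
          refine ⟨h1, h2, by simp [h3], ?_, ?_, ?_, ?_⟩
          · simp [List.filter_append, h4]
          · simp [List.filter_append, h5]
          · simp [List.filter_append, h6]
          · intro p hp'
            rcases List.mem_append.mp hp' with hh | hh
            · exact h7 p hh
            · simp at hh; simp [hh]
        · have hfc : ¬ fc < 2 := by rw [h3]; exact_mod_cast hlen
          have ea : pvStepA ((fp, fn, fc), acc) c = ((fp, fn, fc), acc) := by
            simp [pvStepA, hu, hfc]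
          have eb : pvStepB (pos, neg, neut) c = (pos, neg, neut) := by
            simp [pvStepB, hu, hlen]
          rw [ea, eb]
          exact ⟨h1, h2, h3, h4, h5, h6, h7⟩
      · have ea : pvStepA ((fp, fn, fc), acc) c = ((fp, fn, fc), acc) := by
          simp [pvStepA, hp, hn, hu]
        have eb : pvStepB (pos, neg, neut) c = (pos, neg, neut) := by
          simp [pvStepB, hp, hn, hu]
        rw [ea, eb]
        exact ⟨h1, h2, h3, h4, h5, h6, h7⟩

lemma rel_foldl (cs : List (List (String × String)))
    (sa : (Bool × Bool × Int) × List (List (String × String) × Int))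
    (sb : Option (List (String × String)) × Option (List (String × String)) × List (List (String × String)))
    (hrel : pvRel sa sb) : pvRel (cs.foldl pvStepA sa) (cs.foldl pvStepB sb) := by
  induction cs generalizing sa sb with
  | nil => exact hrel
  | cons c t ih => exact ih _ _ (rel_step sa sb c hrel)

-- ===== VERDICT (by name: the statement is the Claim_ definition above) =====
theorem filtered_comments_by_type_spec : Claim_equal_filtered_comments_by_type := by
  intro comments _ _
  unfold Spec_filtered_comments_by_type filtered_comments_by_type filtered_comments_by_type_alt
  have hrel := rel_foldl comments ((false, false, 0), []) (none, none, [])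
    (by simp [pvRel])
  obtain ⟨h1, h2, h3, h4, h5, h6, h7⟩ := hrel
  simp only
  rw [sorted3 _ h7, h4, h5, h6]
  simp [Function.comp_def]
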